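-- pv_equiv track=rewrite | github.com/bizhe3/EcoGPT | scripts/data_processing/analyze_dataset.py | extract_from_messages
-- ===== SOURCE A (Python) =====
-- from typing import Dict, List, Any, Optional, Tuple
--
-- def normalize_role(role: str) -> str:
--     role = (role or "").strip().lower()
--     mapping = {
--         "human": "user",
--         "user": "user",
--         "assistant": "assistant",
--         "gpt": "assistant",
--         "bot": "assistant",
--         "system": "system",
--     }
--     return mapping.get(role, role)
--
-- def extract_from_messages(messages: List[Dict[str, Any]]) -> Tuple[Optional[str], Optional[str]]:
--     """
--     从 messages / conversations 中提取：
--     - prompt: 最后一条 assistant 回答之前的所有 user 内容拼接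
--     - answer: 最后一条 assistant 内容
--     """
--     if not messages:
--         return None, None
--
--     normalized = []
--     for m in messages:
--         role = normalize_role(str(m.get("role", m.get("from", ""))))
--         content = m.get("content", m.get("value", ""))
--         content = "" if content is None else str(content).strip()
--         if not content:
--             continue
--         normalized.append({"role": role, "content": content})
--
--     if not normalized:
--         return None, None
--
--     last_assistant_idx = None
--     for i in range(len(normalized) - 1, -1, -1):
--         if normalized[i]["role"] == "assistant":
--             last_assistant_idx = i
--             break
--
--     if last_assistant_idx is None:
--         return None, None
--
--     answer = normalized[last_assistant_idx]["content"]
--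
--     prompt_parts = []
--     for i in range(last_assistant_idx):
--         if normalized[i]["role"] == "user":
--             prompt_parts.append(normalized[i]["content"])
--
--     prompt = "\n".join(prompt_parts).strip()
--     return prompt, answer
-- ===== SOURCE B (Python) =====
-- from typing import Dict, List, Any, Optional, Tuple
--
-- def normalize_role(role: str) -> str:
--     role = (role or "").strip().lower()
--     mapping = {
--         "human": "user",
--         "user": "user",
--         "assistant": "assistant",
--         "gpt": "assistant",
--         "bot": "assistant",
--         "system": "system",
--     }
--     return mapping.get(role, role)
--
-- def extract_from_messages(messages: List[Dict[str, Any]]) -> Tuple[Optional[str], Optional[str]]: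
--     # Single forward pass: accumulate user contents; snapshot the joined prompt
--     # at every assistant message, keeping the last one.
--     prompt_parts = []
--     prompt = None
--     answer = None
--     for m in messages:
--         role = normalize_role(str(m.get("role", m.get("from", ""))))
--         content = m.get("content", m.get("value", ""))
--         content = "" if content is None else str(content).strip()
--         if not content:
--             continue
--         if role == "assistant":
--             answer = content
--             prompt = "\n".join(prompt_parts)
--         elif role == "user":
--             prompt_parts.append(content)
--     if answer is None:
--         return None, None
--     return prompt.strip(), answer
-- ===== Notes on version B (the rewrite author's own statement) =====
-- stated objective: simpler
-- what changed: B replaces A's three passes (build a normalized list, backward index scan for the last assistant, separate prefix loop collecting user contents) with a single forward pass that appends user contents to a running list and snapshots the joined prompt at each assistant message.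
import Mathlib
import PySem

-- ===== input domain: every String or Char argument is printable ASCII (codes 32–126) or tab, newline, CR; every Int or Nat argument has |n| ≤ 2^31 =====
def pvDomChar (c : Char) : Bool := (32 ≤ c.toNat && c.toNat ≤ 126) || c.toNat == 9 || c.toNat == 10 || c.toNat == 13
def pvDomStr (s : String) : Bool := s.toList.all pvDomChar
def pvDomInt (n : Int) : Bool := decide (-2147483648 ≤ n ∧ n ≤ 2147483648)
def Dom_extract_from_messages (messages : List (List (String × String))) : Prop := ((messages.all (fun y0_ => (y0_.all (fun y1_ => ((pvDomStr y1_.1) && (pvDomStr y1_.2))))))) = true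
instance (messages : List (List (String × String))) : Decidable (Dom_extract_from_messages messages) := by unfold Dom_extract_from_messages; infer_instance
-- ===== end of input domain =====

-- B replaces A's three passes (normalize, backward scan for the last assistant,
-- prefix collection of user contents) by one forward pass that snapshots the
-- joined prompt at each assistant message; objective: simpler (same cost).

-- ===== PORT A =====

-- normalize_role (shared helper of the Python module, called by both A and B)
def pvNormRole (role : String) : String :=
  let role := if role == "" then "" else role            -- (role or "")
  let role := PySem.Str.lower (PySem.Str.strip role)
  let mapping : PySem.Dict String String := PySem.Dict.mk
    [("human", "user"), ("user", "user"), ("assistant", "assistant"),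
     ("gpt", "assistant"), ("bot", "assistant"), ("system", "system")]
  mapping.getD role role

-- role/content extraction shared by both loops (str(...) on a str is the identity)
def pvRole (m : List (String × String)) : String :=
  pvNormRole ((PySem.Dict.mk m).getD "role" ((PySem.Dict.mk m).getD "from" ""))

def pvContent (m : List (String × String)) : String :=
  PySem.Str.strip ((PySem.Dict.mk m).getD "content" ((PySem.Dict.mk m).getD "value" ""))

-- A: 'for i in range(len(normalized)-1, -1, -1): if … == "assistant": idx = i; break'
def pvFindLastA : List Int → List (String × String) → Option Int
  | [], _ => none
  | i :: rest, norm =>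
      if (PySem.List.pyGetD norm i ("", "")).1 == "assistant" then some i
      else pvFindLastA rest norm

def extract_from_messages (messages : List (List (String × String))) : Option String × Option String :=
  if messages = [] then (none, none)
  else
    let normalized := messages.foldl (fun acc m =>
      let role := pvRole m
      let content := pvContent m
      if content == "" then acc else acc ++ [(role, content)]) []
    if normalized = [] then (none, none)
    else
      match pvFindLastA (PySem.List.pyRange ((normalized.length : Int) - 1) (-1) (-1)) normalized with
      | none => (none, none)
      | some i =>
          let answer := (PySem.List.pyGetD normalized i ("", "")).2
          let prompt_parts := (PySem.List.pyRange 0 i 1).foldl (fun acc j =>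
            if (PySem.List.pyGetD normalized j ("", "")).1 == "user" then
              acc ++ [(PySem.List.pyGetD normalized j ("", "")).2]
            else acc) []
          (some (PySem.Str.strip (PySem.Str.join "\n" prompt_parts)), some answer)

-- ===== PORT B =====

-- B's loop body on state (prompt_parts, prompt, answer)
def pvStepB (st : List String × Option String × Option String) (m : List (String × String)) :
    List String × Option String × Option String :=
  let role := pvRole m
  let content := pvContent m
  if content == "" then st
  else if role == "assistant" then (st.1, some (PySem.Str.join "\n" st.1), some content)
  else if role == "user" then (st.1 ++ [content], st.2.1, st.2.2)
  else st

def extract_from_messages_alt (messages : List (List (String × String))) : Option String × Option String :=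
  let st := messages.foldl pvStepB ([], none, none)
  match st.2.2, st.2.1 with
  | some answer, some prompt => (some (PySem.Str.strip prompt), some answer)
  | _, _ => (none, none)

-- ===== PRECONDITION & SPEC =====
def Spec_extract_from_messages (messages : List (List (String × String))) (out : Option String × Option String) : Prop := out = extract_from_messages_alt messages
instance (messages : List (List (String × String))) (out : Option String × Option String) : Decidable (Spec_extract_from_messages messages out) := by unfold Spec_extract_from_messages; infer_instance

-- ===== CLAIM (what is proved, stated in full; the proofs are below) =====
def Claim_equal_extract_from_messages : Prop := ∀ (messages : List (List (String × String))), Dom_extract_from_messages messages → Spec_extract_from_messages messages (extract_from_messages messages)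

-- ===== LEMMAS AND PROOFS =====

-- the normalized entry of a message, as an Option (none = skipped empty content)
def pvNorm? (m : List (String × String)) : Option (String × String) :=
  if pvContent m == "" then none else some (pvRole m, pvContent m)

-- user contents of a normalized list
def pvUsers (norm : List (String × String)) : List String :=
  (norm.filter (fun p => p.1 == "user")).map (·.2)

-- structural spec of the shared core on the normalized list, carrying prompt parts
def pvCore : List (String × String) → List String → Option (String × String)
  | [], _ => none
  | x :: rest, parts =>
      let parts' := if x.1 == "user" then parts ++ [x.2] else parts
      match pvCore rest parts' with
      | some r => some r
      | none => if x.1 == "assistant" then some (PySem.Str.join "\n" parts, x.2) else none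

theorem pvUsers_cons (x : String × String) (l : List (String × String)) :
    pvUsers (x :: l) = (if x.1 == "user" then [x.2] else []) ++ pvUsers l := by
  by_cases h : x.1 == "user" <;> simp [pvUsers, h]

-- A's normalized list is the filterMap of pvNorm?
theorem normalized_eq (messages : List (List (String × String))) :
    messages.foldl (fun acc m =>
      let role := pvRole m
      let content := pvContent m
      if content == "" then acc else acc ++ [(role, content)]) [] = messages.filterMap pvNorm? := by
  have h : ∀ (l : List (List (String × String))) (acc : List (String × String)),
      l.foldl (fun acc m =>
        let role := pvRole m
        let content := pvContent m
        if content == "" then acc else acc ++ [(role, content)]) acc = acc ++ l.filterMap pvNorm? := by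
    intro l
    induction l with
    | nil => intro acc; simp
    | cons m rest ih =>
        intro acc
        by_cases hc : pvContent m == ""
        · have hn : pvNorm? m = none := by simp [pvNorm?, hc]
          simp only [List.foldl_cons, List.filterMap_cons, hn, hc, if_true]
          exact ih acc
        · have hn : pvNorm? m = some (pvRole m, pvContent m) := by simp [pvNorm?, hc]
          simp only [List.foldl_cons, List.filterMap_cons, hn, hc]
          rw [ih]
          simp
  exact (h messages []).trans (by simp)

-- B's loop step on an already-normalized entry (proof-side name)
def pvG (st : List String × Option String × Option String) (p : String × String) :
    List String × Option String × Option String :=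
  if p.1 == "assistant" then (st.1, some (PySem.Str.join "\n" st.1), some p.2)
  else if p.1 == "user" then (st.1 ++ [p.2], st.2.1, st.2.2)
  else st

-- B's fold over messages is the pvG-fold over the normalized list
theorem foldB_eq (messages : List (List (String × String)))
    (st : List String × Option String × Option String) :
    messages.foldl pvStepB st = (messages.filterMap pvNorm?).foldl pvG st := by
  induction messages generalizing st with
  | nil => rfl
  | cons m rest ih =>
      simp only [List.foldl_cons, List.filterMap_cons]
      by_cases hc : pvContent m == ""
      · have hn : pvNorm? m = none := by simp [pvNorm?, hc]
        have hs : pvStepB st m = st := by unfold pvStepB; rw [if_pos hc]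
        rw [hn, hs]
        exact ih st
      · have hn : pvNorm? m = some (pvRole m, pvContent m) := by simp [pvNorm?, hc]
        have hs : pvStepB st m = pvG st (pvRole m, pvContent m) := by
          unfold pvStepB pvG; rw [if_neg hc]
        simp only [hn]
        rw [hs, ih, List.foldl_cons]

-- full characterization of the pvG-fold state by pvCore
theorem foldg_char (norm : List (String × String)) (parts : List String)
    (pr a : Option String) :
    norm.foldl pvG (parts, pr, a) =
      (parts ++ pvUsers norm,
        match pvCore norm parts with
        | some r => (some r.1, some r.2)
        | none => (pr, a)) := by
  induction norm generalizing parts pr a with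
  | nil => simp [pvUsers, pvCore]
  | cons x rest ih =>
      simp only [List.foldl_cons, pvG, pvCore, pvUsers_cons]
      by_cases ha : x.1 == "assistant"
      · have hu : (x.1 == "user") = false := by
          simp only [beq_iff_eq] at ha ⊢; simp [ha]
        simp only [ha, if_true, hu, ih]
        cases hc : pvCore rest parts <;> simp [hc]
      · simp only [ha, Bool.false_eq_true, if_false]
        by_cases hu : x.1 == "user"
        · simp only [hu, if_true, ih, List.singleton_append]
          cases pvCore rest (parts ++ [x.2]) <;> simp
        · simp only [hu, Bool.false_eq_true, if_false, ih]
          cases pvCore rest parts <;> simp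

-- pvCore on a snoc
theorem pvCore_snoc (norm : List (String × String)) (x : String × String) (parts : List String) :
    pvCore (norm ++ [x]) parts =
      if x.1 == "assistant" then some (PySem.Str.join "\n" (parts ++ pvUsers norm), x.2)
      else pvCore norm parts := by
  induction norm generalizing parts with
  | nil =>
      by_cases ha : x.1 == "assistant" <;> simp [pvCore, pvUsers, ha]
  | cons y rest ih =>
      simp only [List.cons_append, pvCore, ih, pvUsers_cons]
      by_cases ha : x.1 == "assistant"
      · by_cases hu : y.1 == "user" <;> simp [ha, hu, List.append_assoc]
      · simp [ha]

-- pvFindLastA returns a member of its range list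
theorem pvFindLastA_mem (r : List Int) (norm : List (String × String)) (i : Int)
    (h : pvFindLastA r norm = some i) : i ∈ r := by
  induction r with
  | nil => simp [pvFindLastA] at h
  | cons j rest ih =>
      simp only [pvFindLastA] at h
      by_cases hj : (PySem.List.pyGetD norm j ("", "")).1 == "assistant"
      · simp [hj] at h; simp [h]
      · simp only [hj, Bool.false_eq_true, if_false] at h
        exact List.mem_cons_of_mem _ (ih h)

-- pvFindLastA ignores an appended element when all scanned indices lie inside norm
theorem pvFindLastA_append (r : List Int) (norm : List (String × String)) (x : String × String)
    (hb : ∀ i ∈ r, 0 ≤ i ∧ i < (norm.length : Int)) :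
    pvFindLastA r (norm ++ [x]) = pvFindLastA r norm := by
  induction r with
  | nil => rfl
  | cons j rest ih =>
      have hj := hb j (List.mem_cons_self ..)
      have hget : PySem.List.pyGetD (norm ++ [x]) j ("", "") = PySem.List.pyGetD norm j ("", "") := by
        rw [PySem.List.pyGetD_eq_getElem _ _ hj.1 (by simp; omega),
            PySem.List.pyGetD_eq_getElem _ _ hj.1 (by omega)]
        exact List.getElem_append_left (by omega)
      simp only [pvFindLastA, hget]
      exact if_congr Iff.rfl rfl (ih (fun i hi => hb i (List.mem_cons_of_mem _ hi)))

-- the A-side prompt_parts loop over the full index range computes pvUsers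
theorem partsLoop_eq (norm : List (String × String)) :
    (PySem.List.pyRange 0 (norm.length : Int) 1).foldl (fun acc j =>
        if (PySem.List.pyGetD norm j ("", "")).1 == "user" then
          acc ++ [(PySem.List.pyGetD norm j ("", "")).2]
        else acc) [] = pvUsers norm := by
  have h1 := PySem.List.foldl_pyRange_zero_pyGetD' norm ("", "")
    (fun (acc : List String) (p : String × String) =>
      if p.1 == "user" then acc ++ [p.2] else acc) []
  rw [h1]
  have h2 := PySem.List.foldl_append_if (l := norm) (acc := ([] : List String))
    (p := fun q : String × String => q.1 == "user") (f := fun q : String × String => q.2)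
  simpa [pvUsers] using h2

-- the prompt_parts loop reads only indices below i, so an appended element is invisible
theorem partsLoop_append (norm : List (String × String)) (x : String × String) (i : Int)
    (hi : i ≤ (norm.length : Int)) :
    (PySem.List.pyRange 0 i 1).foldl (fun acc j =>
        if (PySem.List.pyGetD (norm ++ [x]) j ("", "")).1 == "user" then
          acc ++ [(PySem.List.pyGetD (norm ++ [x]) j ("", "")).2]
        else acc) [] =
    (PySem.List.pyRange 0 i 1).foldl (fun acc j =>
        if (PySem.List.pyGetD norm j ("", "")).1 == "user" then
          acc ++ [(PySem.List.pyGetD norm j ("", "")).2]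
        else acc) [] := by
  apply PySem.List.foldl_congr_mem
  intro acc j hj
  have hjb := (PySem.List.mem_pyRange_one).1 hj
  have hget : PySem.List.pyGetD (norm ++ [x]) j ("", "") = PySem.List.pyGetD norm j ("", "") := by
    rw [PySem.List.pyGetD_eq_getElem _ _ hjb.1 (by simp; omega),
        PySem.List.pyGetD_eq_getElem _ _ hjb.1 (by omega)]
    exact List.getElem_append_left (by omega)
  simp only [hget]

-- A's post-normalization core equals pvCore (rendered with the final strip)
theorem Acore_eq (norm : List (String × String)) :
    (match pvFindLastA (PySem.List.pyRange ((norm.length : Int) - 1) (-1) (-1)) norm with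
      | none => ((none, none) : Option String × Option String)
      | some i =>
          (some (PySem.Str.strip (PySem.Str.join "\n"
              ((PySem.List.pyRange 0 i 1).foldl (fun acc j =>
                if (PySem.List.pyGetD norm j ("", "")).1 == "user" then
                  acc ++ [(PySem.List.pyGetD norm j ("", "")).2]
                else acc) []))),
            some (PySem.List.pyGetD norm i ("", "")).2)) =
      (match pvCore norm [] with
        | some r => (some (PySem.Str.strip r.1), some r.2)
        | none => (none, none)) := by
  induction norm using List.reverseRecOn with
  | nil => simp [pvFindLastA, PySem.List.pyRange_neg_one_eq_nil, pvCore]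
  | append_singleton norm x ih =>
      have hlen : ((norm ++ [x]).length : Int) - 1 = (norm.length : Int) := by simp
      rw [hlen, PySem.List.pyRange_neg_one_cons (by omega), pvCore_snoc]
      have hgetx : PySem.List.pyGetD (norm ++ [x]) (norm.length : Int) ("", "") = x := by
        rw [PySem.List.pyGetD_eq_getElem _ _ (by omega) (by simp)]
        simp
      by_cases ha : x.1 == "assistant"
      · simp only [pvFindLastA, hgetx, ha, if_true]
        rw [partsLoop_append norm x _ le_rfl, partsLoop_eq]
        simp
      · simp only [pvFindLastA, hgetx, ha, Bool.false_eq_true, if_false]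
        rw [pvFindLastA_append _ _ _ (fun i hi => by
          have := (PySem.List.mem_pyRange_neg_one).1 hi; omega)]
        rw [← ih]
        cases hf : pvFindLastA (PySem.List.pyRange ((norm.length : Int) - 1) (-1) (-1)) norm with
        | none => rfl
        | some i =>
            have hmem := pvFindLastA_mem _ _ _ hf
            have hb := (PySem.List.mem_pyRange_neg_one).1 hmem
            have hgeti : PySem.List.pyGetD (norm ++ [x]) i ("", "") = PySem.List.pyGetD norm i ("", "") := by
              rw [PySem.List.pyGetD_eq_getElem _ _ (by omega) (by simp; omega),
                  PySem.List.pyGetD_eq_getElem _ _ (by omega) (by omega)]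
              exact List.getElem_append_left (by omega)
            simp only [hgeti, partsLoop_append norm x i (by omega)]

-- ===== VERDICT (by name: the statement is the Claim_ definition above) =====
theorem extract_from_messages_spec : Claim_equal_extract_from_messages := by
  intro messages _
  unfold Spec_extract_from_messages extract_from_messages extract_from_messages_alt
  rw [foldB_eq, normalized_eq, foldg_char]
  by_cases hm : messages = []
  · subst hm
    simp [pvCore]
  · simp only [hm, if_false]
    by_cases hn : messages.filterMap pvNorm? = []
    · rw [hn]
      simp [pvCore]
    · simp only [hn, if_false]
      rw [Acore_eq]
      cases pvCore (messages.filterMap pvNorm?) [] with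
      | none => rfl
      | some r => rfl
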